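-- pv_equiv track=rewrite | github.com/drader/patika-datastructures | PatikaProjects/Python/test3.py | DifferentCases
-- ===== SOURCE A (Python) =====
-- def DifferentCases(strParam):
--     r = ""
--     s = strParam.lower()
--     c = False
--     for i in range(len(s)):
--
--         if (s[i]>='a' and s[i]<='z'):
--             if c or i==0:
--                 r+=s[i].upper()
--                 c = False
--             else:
--                 r+=s[i]
--         else:
--             r+=''
--             c = True
--     return r
-- ===== SOURCE B (Python) =====
-- def DifferentCases(strParam):
--     # group-first: collect maximal lowercase-letter runs, then capitalize each run's head
--     s = strParam.lower()
--     runs = []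
--     cur = ""
--     for ch in s:
--         if 'a' <= ch <= 'z':
--             cur += ch
--         else:
--             if cur:
--                 runs.append(cur)
--                 cur = ""
--     if cur:
--         runs.append(cur)
--     return "".join(w[:1].upper() + w[1:] for w in runs)
-- ===== Notes on version B (the rewrite author's own statement) =====
-- stated objective: alternative
-- what changed: A scans char-by-char carrying a capitalize-next boolean flag and grows the result with repeated string concatenation; B first groups the lowercased string into maximal letter runs and then joins the runs with each run's first character uppercased.
import Mathlib
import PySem

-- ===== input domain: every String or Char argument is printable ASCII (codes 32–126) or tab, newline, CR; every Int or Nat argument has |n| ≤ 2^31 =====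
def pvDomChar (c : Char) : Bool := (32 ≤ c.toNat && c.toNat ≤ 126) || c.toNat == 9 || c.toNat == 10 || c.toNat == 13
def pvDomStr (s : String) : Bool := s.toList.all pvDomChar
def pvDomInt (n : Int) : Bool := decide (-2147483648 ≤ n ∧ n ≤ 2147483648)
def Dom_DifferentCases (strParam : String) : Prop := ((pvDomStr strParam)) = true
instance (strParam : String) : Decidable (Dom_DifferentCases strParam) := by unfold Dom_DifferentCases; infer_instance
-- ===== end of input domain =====

-- B replaces A's char-by-char scan with a capitalize-next flag by a group-then-map pass
-- (collect maximal letter runs, then capitalize each run's head); alternative, same cost.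

-- ===== PORT A =====
-- A's loop body: state (r, c); i is the Python index, ch = s[i]
def aStep (st : List Char × Bool) (p : Int × Char) : List Char × Bool :=
  if 'a' ≤ p.2 ∧ p.2 ≤ 'z' then
    if st.2 || p.1 == 0 then (st.1 ++ PySem.Chars.upper [p.2], false)
    else (st.1 ++ [p.2], st.2)
  else (st.1 ++ [], true)

def DifferentCases (strParam : String) : String :=
  let s := (PySem.Str.lower strParam).toList
  let st := (PySem.List.enumerate s 0).foldl aStep ([], false)
  String.ofList st.1

-- ===== PORT B =====
-- B's loop body: state (runs, cur)
def bStep (st : List (List Char) × List Char) (ch : Char) : List (List Char) × List Char :=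
  if 'a' ≤ ch ∧ ch ≤ 'z' then (st.1, st.2 ++ [ch])
  else if st.2 ≠ [] then (st.1 ++ [st.2], []) else st

-- w[:1].upper() + w[1:]
def bCap (w : List Char) : List Char :=
  PySem.Chars.upper (PySem.Chars.slice w none (some 1)) ++ PySem.Chars.slice w (some 1) none

def DifferentCases_alt (strParam : String) : String :=
  let s := (PySem.Str.lower strParam).toList
  let st := s.foldl bStep ([], [])
  let runs := if st.2 ≠ [] then st.1 ++ [st.2] else st.1
  String.ofList (PySem.Chars.join [] (runs.map bCap))

-- ===== PRECONDITION & SPEC =====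
def Spec_DifferentCases (strParam : String) (out : String) : Prop := out = DifferentCases_alt strParam
instance (strParam : String) (out : String) : Decidable (Spec_DifferentCases strParam out) := by unfold Spec_DifferentCases; infer_instance

-- ===== CLAIM (what is proved, stated in full; the proofs are below) =====
def Claim_equal_DifferentCases : Prop := ∀ (strParam : String), Dom_DifferentCases strParam → Spec_DifferentCases strParam (DifferentCases strParam)

-- ===== LEMMAS AND PROOFS =====

-- A's loop as index-free structural recursion (valid once the index is known nonzero)
def aRun (l : List Char) (st : List Char × Bool) : List Char × Bool :=
  match l with
  | [] => st
  | ch :: t =>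
    if 'a' ≤ ch ∧ ch ≤ 'z' then
      if st.2 then aRun t (st.1 ++ [PySem.Chars.upperChar ch], false)
      else aRun t (st.1 ++ [ch], st.2)
    else aRun t (st.1, true)

lemma upper_singleton (ch : Char) : PySem.Chars.upper [ch] = [PySem.Chars.upperChar ch] := rfl

lemma aFold_enum_eq_aRun (l : List Char) (k : Int) (hk : 1 ≤ k) (st : List Char × Bool) :
    (PySem.List.enumerate l k).foldl aStep st = aRun l st := by
  induction l generalizing k st with
  | nil => rfl
  | cons ch t ih =>
    rw [PySem.List.enumerate_cons, List.foldl_cons, aRun]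
    have hknz : (k == 0) = false := by simp; omega
    by_cases hc : 'a' ≤ ch ∧ ch ≤ 'z'
    · simp only [aStep, hc, hknz, Bool.or_false]
      cases hst : st.2 with
      | true => simp [upper_singleton, ih (k+1) (by omega)]
      | false => simp [ih (k+1) (by omega)]
    · simp [aStep, hc, ih (k+1) (by omega)]

lemma bCap_eq (w : List Char) :
    bCap w = (w.take 1).map PySem.Chars.upperChar ++ w.tail := by
  have h1 : PySem.List.slice w none (some 1) = w.take 1 := by
    simpa using PySem.List.slice_to_natCast (xs := w) (b := 1)
  have h2 : PySem.List.slice w (some 1) none = w.tail := by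
    simp [PySem.List.slice_from_one]
  simp [bCap, PySem.Chars.upper, h1, h2, List.map_take]

lemma bCap_append (w : List Char) (hw : w ≠ []) (ch : Char) :
    bCap (w ++ [ch]) = bCap w ++ [ch] := by
  cases w with
  | nil => exact absurd rfl hw
  | cons a t => simp [bCap_eq]

def joinCap (runs : List (List Char)) : List Char := PySem.Chars.join [] (runs.map bCap)

lemma join_nil_eq_flatten (l : List (List Char)) : PySem.Chars.join [] l = l.flatten := by
  induction l with
  | nil => rfl
  | cons a t ih =>
    cases t with
    | nil => simp [PySem.Chars.join, List.intercalate]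
    | cons b t2 =>
      rw [PySem.Chars.join_cons_cons]
      simp only [List.flatten_cons] at *
      rw [ih]; simp

lemma joinCap_append (runs : List (List Char)) (w : List Char) :
    joinCap (runs ++ [w]) = joinCap runs ++ bCap w := by
  simp [joinCap, join_nil_eq_flatten]

-- B's finalization: append the pending run if nonempty
def bFin (st : List (List Char) × List Char) : List (List Char) :=
  if st.2 ≠ [] then st.1 ++ [st.2] else st.1

-- The core invariant: A's scan from either loop state produces B's grouped output.
-- (1) mid-run (A's flag false, B's cur nonempty, A has already emitted bCap cur);
-- (2) after a non-letter (A's flag true, B's cur empty).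
lemma main_inv (l : List Char) :
    (∀ (runs : List (List Char)) (cur : List Char), cur ≠ [] →
      (aRun l (joinCap runs ++ bCap cur, false)).1 = joinCap (bFin (l.foldl bStep (runs, cur)))) ∧
    (∀ (runs : List (List Char)),
      (aRun l (joinCap runs, true)).1 = joinCap (bFin (l.foldl bStep (runs, [])))) := by
  induction l with
  | nil =>
    refine ⟨fun runs cur hcur => ?_, fun runs => ?_⟩
    · simp [aRun, bFin, hcur, joinCap_append]
    · simp [aRun, bFin]
  | cons ch t ih =>
    refine ⟨fun runs cur hcur => ?_, fun runs => ?_⟩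
    · by_cases hc : 'a' ≤ ch ∧ ch ≤ 'z'
      · rw [aRun]
        simp only [hc, List.foldl_cons, bStep]
        have : joinCap runs ++ bCap cur ++ [ch] = joinCap runs ++ bCap (cur ++ [ch]) := by
          rw [bCap_append cur hcur ch, List.append_assoc]
        simp only [this]
        exact ih.1 runs (cur ++ [ch]) (by simp)
      · rw [aRun]
        simp only [hc, if_false, List.foldl_cons, bStep]
        simp only [hcur, ne_eq]
        rw [← joinCap_append runs cur]
        exact ih.2 (runs ++ [cur])
    · by_cases hc : 'a' ≤ ch ∧ ch ≤ 'z'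
      · rw [aRun]
        simp only [hc, List.foldl_cons, bStep, if_pos]
        have hcap : joinCap runs ++ [PySem.Chars.upperChar ch] = joinCap runs ++ bCap [ch] := by
          simp [bCap_eq]
        simp only [hcap]
        exact ih.1 runs [ch] (by simp)
      · rw [aRun]
        simp only [hc, if_false, List.foldl_cons, bStep]
        simp only [ne_eq, not_true_eq_false, ite_false]
        exact ih.2 runs

lemma core_eq (l : List Char) :
    ((PySem.List.enumerate l 0).foldl aStep ([], false)).1 =
    PySem.Chars.join [] ((bFin (l.foldl bStep ([], []))).map bCap) := by
  cases l with
  | nil => rfl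
  | cons ch t =>
    rw [PySem.List.enumerate_cons, List.foldl_cons, List.foldl_cons]
    by_cases hc : 'a' ≤ ch ∧ ch ≤ 'z'
    · have ha : aStep ([], false) (0, ch) = (bCap [ch], false) := by
        simp [aStep, hc, bCap_eq, upper_singleton]
      have hb : bStep ([], []) ch = ([], [ch]) := by simp [bStep, hc]
      rw [ha, hb, show (0:Int)+1 = 1 by norm_num, aFold_enum_eq_aRun t 1 (by omega)]
      have h := (main_inv t).1 [] [ch] (by simp)
      simpa [joinCap, join_nil_eq_flatten] using h
    · have ha : aStep ([], false) (0, ch) = ([], true) := by simp [aStep, hc]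
      have hb : bStep ([], []) ch = ([], []) := by simp [bStep, hc]
      rw [ha, hb, show (0:Int)+1 = 1 by norm_num, aFold_enum_eq_aRun t 1 (by omega)]
      have h := (main_inv t).2 []
      simpa [joinCap, join_nil_eq_flatten] using h

-- ===== VERDICT (by name: the statement is the Claim_ definition above) =====
theorem DifferentCases_spec : Claim_equal_DifferentCases := by
  intro strParam _
  exact congrArg String.ofList (core_eq ((PySem.Str.lower strParam).toList))
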